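-- pv_equiv track=rewrite | github.com/TheJim123/Zapiski | Druga stopnja/Osnove programiranja v diskretni matematiki/Vaje/Izpit vaje/izpit vaja.py | ranglex
-- ===== SOURCE A (Python) =====
-- import math
--
-- def ranglex(mn, k, n):
--     r = 0
--     for i in range(1, k+1):
--         a = 1 if i == 1 else mn[i-2] + 1
--         if a <= mn[i-1] -1:
--             for j in range(a, mn[i-1]):
--                 r += math.comb(n-j, k-i)
--     return  r
-- ===== SOURCE B (Python) =====
-- import math
--
-- def ranglex(mn, k, n):
--     # hockey-stick identity: each inner range-sum collapses to a difference of two binomials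
--     r = 0
--     prev = 0
--     for i in range(1, k + 1):
--         m = mn[i - 1]
--         a = 1 if i == 1 else prev + 1
--         if a <= m - 1:
--             c = k - i
--             r += math.comb(n - a + 1, c + 1) - math.comb(n - m + 1, c + 1)
--         prev = m
--     return r
-- ===== Notes on version B (the rewrite author's own statement) =====
-- stated objective: faster
-- what changed: Each inner loop summing math.comb(n-j, k-i) over j in range(a, mn[i-1]) is replaced by the hockey-stick closed form comb(n-a+1, k-i+1) - comb(n-mn[i-1]+1, k-i+1), and B carries the previous element in a variable instead of re-indexing mn[i-2].
import Mathlib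
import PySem

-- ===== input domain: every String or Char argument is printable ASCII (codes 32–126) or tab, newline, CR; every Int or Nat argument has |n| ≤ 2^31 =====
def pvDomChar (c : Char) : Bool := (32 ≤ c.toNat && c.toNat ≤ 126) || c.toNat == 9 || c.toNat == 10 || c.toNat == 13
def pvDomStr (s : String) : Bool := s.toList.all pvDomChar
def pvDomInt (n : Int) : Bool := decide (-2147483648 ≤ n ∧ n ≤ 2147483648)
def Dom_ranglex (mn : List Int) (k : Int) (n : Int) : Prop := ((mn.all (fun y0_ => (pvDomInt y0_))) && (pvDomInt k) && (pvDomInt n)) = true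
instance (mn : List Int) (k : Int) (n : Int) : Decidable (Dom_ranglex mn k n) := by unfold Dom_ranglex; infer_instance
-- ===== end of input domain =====

-- B replaces A's inner range-sum of binomials by a difference of two binomials (hockey-stick
-- identity), turning O(total gap width) comb calls into O(k); exact on Pre_ (where A returns).

-- math.comb a b : exact for 0 ≤ a, 0 ≤ b (Pre_ excludes the negative arguments, where Python raises ValueError)
def pyComb (a b : Int) : Int := if 0 ≤ a ∧ 0 ≤ b then (Nat.choose a.toNat b.toNat : Int) else 0

-- ===== PORT A =====
def ranglex (mn : List Int) (k : Int) (n : Int) : Int :=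
  (PySem.List.pyRange 1 (k+1) 1).foldl (fun r i =>
    let a : Int := if i = 1 then 1 else PySem.List.pyGetD mn (i-2) 0 + 1
    if a ≤ PySem.List.pyGetD mn (i-1) 0 - 1 then
      (PySem.List.pyRange a (PySem.List.pyGetD mn (i-1) 0) 1).foldl
        (fun r j => r + pyComb (n-j) (k-i)) r
    else r) 0

-- ===== PORT B =====
def ranglex_alt (mn : List Int) (k : Int) (n : Int) : Int :=
  ((PySem.List.pyRange 1 (k+1) 1).foldl (fun (st : Int × Int) i =>
    let m := PySem.List.pyGetD mn (i-1) 0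
    let a : Int := if i = 1 then 1 else st.2 + 1
    (if a ≤ m - 1 then
      st.1 + (pyComb (n-a+1) (k-i+1) - pyComb (n-m+1) (k-i+1))
    else st.1, m)) (0, 0)).1

-- ===== PRECONDITION & SPEC =====
-- Exactly the inputs where Python A returns: all indices 1..k in range (else IndexError) and,
-- whenever the inner loop runs for index i, its largest j keeps math.comb's first argument ≥ 0
-- (else ValueError).
def Pre_ranglex (mn : List Int) (k : Int) (n : Int) : Prop :=
  k ≤ (mn.length : Int) ∧
  ∀ j, j < k.toNat →
    ((if j = 0 then (1 : Int) else mn.getD (j-1) 0 + 1) ≤ mn.getD j 0 - 1 → mn.getD j 0 ≤ n + 1)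
instance (mn : List Int) (k : Int) (n : Int) : Decidable (Pre_ranglex mn k n) := by
  unfold Pre_ranglex; infer_instance

def pvWitness_ranglex : List Int × Int × Int := ([2, 5, 6], 3, 7)

def Spec_ranglex (mn : List Int) (k : Int) (n : Int) (out : Int) : Prop := out = ranglex_alt mn k n
instance (mn : List Int) (k : Int) (n : Int) (out : Int) : Decidable (Spec_ranglex mn k n out) := by unfold Spec_ranglex; infer_instance

-- ===== CLAIM (what is proved, stated in full; the proofs are below) =====
def Claim_equal_ranglex : Prop := ∀ (mn : List Int) (k : Int) (n : Int), Dom_ranglex mn k n → Pre_ranglex mn k n → Spec_ranglex mn k n (ranglex mn k n)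

-- ===== LEMMAS AND PROOFS =====

-- Pascal's rule for pyComb on nonnegative arguments
lemma pyComb_pascal (x c : Int) (hx : 0 ≤ x) (hc : 0 ≤ c) :
    pyComb (x+1) (c+1) = pyComb x c + pyComb x (c+1) := by
  unfold pyComb
  rw [if_pos (And.intro (by omega : (0:Int) ≤ x+1) (by omega : (0:Int) ≤ c+1)),
      if_pos (And.intro hx hc), if_pos (And.intro hx (by omega : (0:Int) ≤ c+1))]
  rw [show (x+1).toNat = x.toNat + 1 by omega, show (c+1).toNat = c.toNat + 1 by omega,
      Nat.choose_succ_succ]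
  push_cast; ring

-- hockey-stick: the inner sum collapses to a difference of two binomials
lemma hockey (n c : Int) (hc : 0 ≤ c) :
    ∀ (d : Nat) (a m r : Int), (m - a).toNat = d → a ≤ m → m ≤ n + 1 →
    (PySem.List.pyRange a m 1).foldl (fun r j => r + pyComb (n - j) c) r
      = r + (pyComb (n - a + 1) (c + 1) - pyComb (n - m + 1) (c + 1)) := by
  intro d
  induction d with
  | zero =>
    intro a m r hd ham _
    have : m = a := by omega
    subst this
    rw [PySem.List.pyRange_one_eq_nil (le_refl _)]
    simp
  | succ d ih =>
    intro a m r hd ham hmn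
    have hlt : a < m := by omega
    rw [PySem.List.pyRange_one_cons hlt]
    simp only [List.foldl_cons]
    rw [ih (a+1) m (r + pyComb (n - a) c) (by omega) (by omega) hmn]
    have hx : 0 ≤ n - a := by omega
    have : pyComb (n - a + 1) (c + 1) = pyComb (n - a) c + pyComb (n - a) (c + 1) :=
      pyComb_pascal _ _ hx hc
    have hrw : n - (a + 1) + 1 = n - a := by ring
    rw [hrw]
    omega

-- the two loops agree step for step, B carrying the previous element in its state
lemma loop_eq (mn : List Int) (k n : Int)
    (hpre : ∀ j, j < k.toNat →
      ((if j = 0 then (1 : Int) else mn.getD (j-1) 0 + 1) ≤ mn.getD j 0 - 1 → mn.getD j 0 ≤ n + 1)) :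
    ∀ (d : Nat) (i0 rA rB prev : Int), (k + 1 - i0).toNat = d → 1 ≤ i0 →
      (i0 = 1 ∨ prev = PySem.List.pyGetD mn (i0-2) 0) → rA = rB →
    (PySem.List.pyRange i0 (k+1) 1).foldl (fun r i =>
      let a : Int := if i = 1 then 1 else PySem.List.pyGetD mn (i-2) 0 + 1
      if a ≤ PySem.List.pyGetD mn (i-1) 0 - 1 then
        (PySem.List.pyRange a (PySem.List.pyGetD mn (i-1) 0) 1).foldl
          (fun r j => r + pyComb (n-j) (k-i)) r
      else r) rA
    = ((PySem.List.pyRange i0 (k+1) 1).foldl (fun (st : Int × Int) i =>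
        let m := PySem.List.pyGetD mn (i-1) 0
        let a : Int := if i = 1 then 1 else st.2 + 1
        (if a ≤ m - 1 then
          st.1 + (pyComb (n-a+1) (k-i+1) - pyComb (n-m+1) (k-i+1))
        else st.1, m)) (rB, prev)).1 := by
  intro d
  induction d with
  | zero =>
    intro i0 rA rB prev hd _ _ hr
    rw [PySem.List.pyRange_one_eq_nil (by omega)]
    simpa using hr
  | succ d ih =>
    intro i0 rA rB prev hd h1 hprev hr
    have hlt : i0 < k + 1 := by omega
    rw [PySem.List.pyRange_one_cons hlt]
    simp only [List.foldl_cons]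
    have hgd : ∀ (idx : Int) (j : Nat), idx = (j : Int) → PySem.List.pyGetD mn idx 0 = mn.getD j 0 := by
      intro idx j h; rw [h, PySem.List.pyGetD_natCast]
    refine ih (i0+1) _ _ _ (by omega) (by omega) (Or.inr ?_) ?_
    · have : i0 + 1 - 2 = i0 - 1 := by ring
      rw [this]
    · -- the per-step accumulators are equal
      have ha : (if i0 = 1 then (1:Int) else PySem.List.pyGetD mn (i0-2) 0 + 1)
          = (if i0 = 1 then (1:Int) else prev + 1) := by
        rcases hprev with h | h
        · simp [h]
        · rw [h]
      simp only [ha, hr]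
      set m := PySem.List.pyGetD mn (i0-1) 0 with hmdef
      set a : Int := if i0 = 1 then (1:Int) else prev + 1 with hadef
      have hm : m = mn.getD (i0-1).toNat 0 := hgd _ _ (by omega)
      by_cases hb : a ≤ m - 1
      · rw [if_pos hb, if_pos hb]
        have hj : (i0-1).toNat < k.toNat := by omega
        have hple := hpre _ hj
        have hmle : m ≤ n + 1 := by
          rw [hm]
          apply hple
          by_cases hi0 : i0 = 1
          · have hj0 : (i0-1).toNat = 0 := by omega
            rw [hj0, if_pos rfl]
            have haa : a = 1 := by rw [hadef, if_pos hi0]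
            rw [hm, hj0, haa] at hb
            omega
          · have hj0 : ¬ (i0-1).toNat = 0 := by omega
            rw [if_neg hj0]
            have h : prev = PySem.List.pyGetD mn (i0-2) 0 := hprev.resolve_left hi0
            have hpg : prev = mn.getD ((i0-1).toNat - 1) 0 := by
              rw [h]; exact hgd _ _ (by omega)
            have haa : a = mn.getD ((i0-1).toNat - 1) 0 + 1 := by
              rw [hadef, if_neg hi0, hpg]
            rw [hm, haa] at hb
            omega
        rw [hockey n (k-i0) (by omega) (m - a).toNat a m rB rfl (by omega) hmle]
      · rw [if_neg hb, if_neg hb]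

-- ===== VERDICT (by name: the statement is the Claim_ definition above) =====
theorem ranglex_spec : Claim_equal_ranglex := by
  intro mn k n _ hpre
  unfold Spec_ranglex ranglex ranglex_alt
  exact loop_eq mn k n hpre.2 (k + 1 - 1).toNat 1 0 0 0 rfl (le_refl _) (Or.inl rfl) rfl
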